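-- pv_equiv track=rewrite | github.com/pypi-data/pypi-mirror-337 | packages/Product-Tag-generator/product_tag_generator-0.0.1.tar.gz/product_tag_generator-0.0.1/Product_Tag_generator/Tags.py | extract_title_tags
-- ===== SOURCE A (Python) =====
-- STOPWORDS = {
--     'a', 'an', 'and', 'are', 'as', 'at', 'be', 'by', 'for', 'from',
--     'in', 'is', 'it', 'of', 'on', 'or', 'that', 'the', 'this',
--     'to', 'with', 'you', 'your'
-- }
--
-- def extract_title_tags(products, max_words=15, min_word_length=3):
--     """
--     Extract keywords from product titles, focusing on meaningful product terms.
--     Automatically preserves multi-word product names (like 'washing machine').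
--     """
--     word_counts = {}
--     phrase_counts = {}
--
--     if isinstance(products, str):
--         products = [products]
--
--     for item in products:
--         title = getattr(item, 'product_title', item)
--         if not isinstance(title, str):
--             continue
--
--         # Convert to lowercase and extract words
--         words = []
--         current_word = []
--         for char in title.lower() + ' ':  # Add space to flush last word
--             if char.isalpha():
--                 current_word.append(char)
--             elif current_word:
--                 word = ''.join(current_word)
--                 if len(word) >= min_word_length and word not in STOPWORDS:
--                     words.append(word)
--                 current_word = []
--
--         # Count individual words and 2-word phrases
--         for i, word in enumerate(words):
--             word_counts[word] = word_counts.get(word, 0) + 1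
--             if i < len(words) - 1:
--                 phrase = f"{word} {words[i+1]}"
--                 phrase_counts[phrase] = phrase_counts.get(phrase, 0) + 1
--
--     # Combine results prioritizing phrases
--     combined = {**word_counts, **phrase_counts}
--     return sorted(combined.keys(), key=lambda x: (-combined[x], x))[:max_words]
-- ===== SOURCE B (Python) =====
-- STOPWORDS = {
--     'a', 'an', 'and', 'are', 'as', 'at', 'be', 'by', 'for', 'from',
--     'in', 'is', 'it', 'of', 'on', 'or', 'that', 'the', 'this',
--     'to', 'with', 'you', 'your'
-- }
--
--
-- def _words(title, min_word_length):
--     """Two-pointer tokenizer: scan maximal alphabetic runs of the lowered title."""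
--     t = title.lower()
--     n = len(t)
--     words = []
--     i = 0
--     while i < n:
--         if not t[i].isalpha():
--             i += 1
--             continue
--         j = i + 1
--         while j < n and t[j].isalpha():
--             j += 1
--         w = t[i:j]
--         if j - i >= min_word_length and w not in STOPWORDS:
--             words.append(w)
--         i = j
--     return words
--
--
-- def extract_title_tags(products, max_words=15, min_word_length=3):
--     if isinstance(products, str):
--         products = [products]
--     counts = {}
--     for title in products:
--         if not isinstance(title, str):
--             continue
--         ws = _words(title, min_word_length)
--         toks = ws + ['{} {}'.format(a, b) for a, b in zip(ws, ws[1:])]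
--         for tok in toks:
--             counts[tok] = counts.get(tok, 0) + 1
--     return sorted(counts, key=lambda x: (-counts[x], x))[:max_words]
-- ===== Notes on version B (the rewrite author's own statement) =====
-- stated objective: simpler
-- what changed: Replaces A's per-character accumulator/flush state machine (with the appended-space flush trick) by a two-pointer scanner over maximal alphabetic runs, builds 2-word phrases via zip(words, words[1:]) instead of enumerate with a bounds guard and indexed lookup, and keeps one combined counter dict instead of two dicts merged with {**a, **b}.
import Mathlib
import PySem

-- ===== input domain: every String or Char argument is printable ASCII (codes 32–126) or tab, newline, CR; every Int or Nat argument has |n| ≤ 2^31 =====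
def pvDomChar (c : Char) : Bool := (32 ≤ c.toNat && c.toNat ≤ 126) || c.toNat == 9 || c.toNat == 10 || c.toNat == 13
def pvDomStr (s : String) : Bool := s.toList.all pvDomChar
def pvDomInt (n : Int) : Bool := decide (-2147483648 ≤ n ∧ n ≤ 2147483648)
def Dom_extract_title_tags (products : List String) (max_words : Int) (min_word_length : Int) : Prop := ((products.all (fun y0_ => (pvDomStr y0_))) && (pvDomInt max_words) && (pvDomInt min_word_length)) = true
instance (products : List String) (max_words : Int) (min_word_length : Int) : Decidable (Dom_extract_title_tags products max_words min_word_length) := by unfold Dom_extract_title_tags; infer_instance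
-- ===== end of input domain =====

-- B replaces A's per-character accumulator/flush state machine by a two-pointer scan over maximal
-- alphabetic runs, zip-built phrases, and a single combined counter dict (objective: simpler).

-- ===== PORT A =====
-- module-level STOPWORDS set (shared by both ports, as in the Python module)
def pvStop : PySem.Set String :=
  PySem.Set.ofList ["a","an","and","are","as","at","be","by","for","from","in","is","it","of",
    "on","or","that","the","this","to","with","you","your"]

-- one step of A's character loop: state = (words, current_word)
def aTokStep (min_word_length : Int) (s : List String × List Char) (c : Char) :
    List String × List Char :=
  if PySem.Str.isalpha c then (s.1, s.2 ++ [c])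
  else if s.2 ≠ [] then
    (if min_word_length ≤ PySem.Str.len (String.ofList s.2) ∧
        PySem.Set.contains pvStop (String.ofList s.2) = false
      then s.1 ++ [String.ofList s.2] else s.1, [])
  else s

-- A's word extraction: loop over title.lower() + ' '
def aWords (min_word_length : Int) (title : String) : List String :=
  (((PySem.Str.lower title ++ " ").toList).foldl (aTokStep min_word_length) ([], [])).1

-- A's per-title counting loop over enumerate(words), two dicts (word_counts, phrase_counts)
def aCountStep (min_word_length : Int)
    (s : PySem.Dict String Int × PySem.Dict String Int) (title : String) :
    PySem.Dict String Int × PySem.Dict String Int :=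
  let words := aWords min_word_length title
  (PySem.List.enumerate words 0).foldl
    (fun s e =>
      (s.1.modify e.2 0 (· + 1),
       if e.1 < (words.length : Int) - 1 then
         -- words[i+1]: the index i+1 is in range under the guard, so pyGetD is exact here
         s.2.modify (e.2 ++ " " ++ PySem.List.pyGetD words (e.1 + 1) "") 0 (· + 1)
       else s.2)) s

-- (the isinstance/getattr lines of the Python are identities on List String inputs)
def extract_title_tags (products : List String) (max_words : Int) (min_word_length : Int) :
    List String :=
  let st := products.foldl (aCountStep min_word_length) (PySem.Dict.empty, PySem.Dict.empty)
  let combined := st.1.update st.2.items   -- {**word_counts, **phrase_counts}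
  PySem.List.slice
    (PySem.List.sorted2 combined.keys (fun x => -(combined.getD x 0)) (fun x => x))
    none (some max_words)

-- ===== PORT B =====
-- B's two-pointer tokenizer: scan maximal alphabetic runs (Source B's while loops)
def altWords (min_word_length : Int) : List Char → List String
  | [] => []
  | c :: r =>
    if PySem.Str.isalpha c then
      (if min_word_length ≤ ((c :: r.takeWhile PySem.Str.isalpha).length : Int) ∧
          PySem.Set.contains pvStop (String.ofList (c :: r.takeWhile PySem.Str.isalpha)) = false
        then [String.ofList (c :: r.takeWhile PySem.Str.isalpha)] else [])
        ++ altWords min_word_length (r.dropWhile PySem.Str.isalpha)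
    else altWords min_word_length r
termination_by l => l.length
decreasing_by
  · simp only [List.length_cons]
    exact Nat.lt_succ_of_le (List.length_dropWhile_le _ _)
  · simp

def extract_title_tags_alt (products : List String) (max_words : Int) (min_word_length : Int) :
    List String :=
  let counts := products.foldl
    (fun d title =>
      let ws := altWords min_word_length (PySem.Str.lower title).toList
      ((ws ++ (ws.zip ws.tail).map (fun p => p.1 ++ " " ++ p.2)).foldl
        (fun d t => d.modify t 0 (· + 1)) d))
    PySem.Dict.empty
  PySem.List.slice
    (PySem.List.sorted2 counts.keys (fun x => -(counts.getD x 0)) (fun x => x))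
    none (some max_words)

-- ===== PRECONDITION & SPEC =====
def Spec_extract_title_tags (products : List String) (max_words : Int) (min_word_length : Int) (out : List String) : Prop := out = extract_title_tags_alt products max_words min_word_length
instance (products : List String) (max_words : Int) (min_word_length : Int) (out : List String) : Decidable (Spec_extract_title_tags products max_words min_word_length out) := by unfold Spec_extract_title_tags; infer_instance

-- ===== CLAIM (what is proved, stated in full; the proofs are below) =====
def Claim_equal_extract_title_tags : Prop := ∀ (products : List String) (max_words : Int) (min_word_length : Int), Dom_extract_title_tags products max_words min_word_length → Spec_extract_title_tags products max_words min_word_length (extract_title_tags products max_words min_word_length)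

-- ===== LEMMAS AND PROOFS =====

-- word-emission test of A's flush branch
def pvKeep (ml : Int) (cw : List Char) : List String :=
  if ml ≤ (cw.length : Int) ∧ String.ofList cw ∉ pvStop
  then [String.ofList cw] else []

def pvEmit (ml : Int) (cw : List Char) : List String :=
  if cw = [] then [] else pvKeep ml cw

-- functional version of A's character loop (no trailing-space trick)
def pvAux (ml : Int) (cw : List Char) : List Char → List String
  | [] => pvEmit ml cw
  | c :: r => if PySem.Str.isalpha c then pvAux ml (cw ++ [c]) r
              else pvEmit ml cw ++ pvAux ml [] r

theorem pvCond_iff (ml : Int) (cw : List Char) :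
    (ml ≤ PySem.Str.len (String.ofList cw) ∧
      PySem.Set.contains pvStop (String.ofList cw) = false) ↔
    (ml ≤ (cw.length : Int) ∧ String.ofList cw ∉ pvStop) := by
  simp [PySem.Str.len]

theorem foldA (ml : Int) (l : List Char) (ws : List String) (cw : List Char) :
    ((l ++ [' ']).foldl (aTokStep ml) (ws, cw)).1 = ws ++ pvAux ml cw l := by
  have hsp : PySem.Str.isalpha ' ' = false := by decide
  induction l generalizing ws cw with
  | nil =>
    simp only [List.nil_append, List.foldl_cons, List.foldl_nil, pvAux]
    by_cases h : cw = []
    · subst h; simp [aTokStep, pvEmit, hsp]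
    · simp only [aTokStep, hsp, Bool.false_eq_true, if_false, ne_eq, h, not_false_eq_true,
        if_pos, pvEmit]
      unfold pvKeep
      by_cases hk : ml ≤ (cw.length : Int) ∧ String.ofList cw ∉ pvStop
      · rw [if_pos ((pvCond_iff ml cw).mpr hk), if_pos hk]
      · rw [if_neg (fun hh => hk ((pvCond_iff ml cw).mp hh)), if_neg hk]; simp
  | cons c r ih =>
    simp only [List.cons_append, List.foldl_cons, pvAux]
    by_cases hc : PySem.Str.isalpha c
    · rw [if_pos hc]
      simp only [aTokStep, hc, if_pos]
      exact ih ws (cw ++ [c])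
    · rw [if_neg hc]
      by_cases h : cw = []
      · subst h
        simp only [aTokStep, hc, Bool.false_eq_true, if_false, ne_eq, not_true_eq_false]
        rw [ih ws []]
        simp [pvEmit]
      · simp only [aTokStep, hc, Bool.false_eq_true, if_false, ne_eq, h, not_false_eq_true,
          if_pos]
        rw [ih _ []]
        simp only [pvEmit, h, if_false]
        unfold pvKeep
        by_cases hk : ml ≤ (cw.length : Int) ∧ String.ofList cw ∉ pvStop
        · rw [if_pos ((pvCond_iff ml cw).mpr hk), if_pos hk]; simp
        · rw [if_neg (fun hh => hk ((pvCond_iff ml cw).mp hh)), if_neg hk]; simp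

theorem auxRun (ml : Int) (l cw : List Char) (h : cw ≠ []) :
    pvAux ml cw l =
      pvKeep ml (cw ++ l.takeWhile PySem.Str.isalpha) ++
        pvAux ml [] (l.dropWhile PySem.Str.isalpha) := by
  induction l generalizing cw with
  | nil => simp [pvAux, pvEmit, h]
  | cons c r ih =>
    by_cases hc : PySem.Str.isalpha c
    · simp only [pvAux, hc, if_pos, List.takeWhile_cons_of_pos, List.dropWhile_cons_of_pos]
      rw [ih (cw ++ [c]) (by simp)]
      simp [List.append_assoc]
    · have hc' : PySem.Str.isalpha c = false := by simpa using hc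
      simp [pvAux, hc', pvEmit, h]

theorem auxAlt (ml : Int) (l : List Char) : pvAux ml [] l = altWords ml l := by
  match l with
  | [] => simp [pvAux, altWords, pvEmit]
  | c :: r =>
    by_cases hc : PySem.Str.isalpha c
    · have h1 : pvAux ml [] (c :: r) = pvAux ml [c] r := by
        simp [pvAux, hc]
      rw [h1, auxRun ml r [c] (by simp)]
      have h2 : altWords ml (c :: r) =
          (if ml ≤ (((c :: r.takeWhile PySem.Str.isalpha)).length : Int) ∧
              String.ofList (c :: r.takeWhile PySem.Str.isalpha) ∉ pvStop
            then [String.ofList (c :: r.takeWhile PySem.Str.isalpha)] else [])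
            ++ altWords ml (r.dropWhile PySem.Str.isalpha) := by
        rw [altWords]
        rw [if_pos hc]
        congr 1
        simp
      rw [h2, ← auxAlt ml (r.dropWhile PySem.Str.isalpha)]
      simp [pvKeep]
    · have hc' : PySem.Str.isalpha c = false := by simpa using hc
      have h1 : pvAux ml [] (c :: r) = pvAux ml [] r := by
        simp [pvAux, hc', pvEmit]
      rw [h1, auxAlt ml r, altWords, if_neg hc]
termination_by l.length
decreasing_by
  all_goals simp only [List.length_cons]
  all_goals first
    | exact Nat.lt_succ_of_le (List.length_dropWhile_le _ _)
    | omega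

theorem aWords_eq (ml : Int) (t : String) :
    aWords ml t = altWords ml (PySem.Str.lower t).toList := by
  unfold aWords
  have h1 : (PySem.Str.lower t ++ " ").toList = (PySem.Str.lower t).toList ++ [' '] := by
    rw [String.toList_append]; rfl
  rw [h1, foldA, auxAlt]
  simp

theorem wordsNoSpace (ml : Int) (l : List Char) :
    ∀ w ∈ altWords ml l, ' ' ∉ w.toList := by
  match l with
  | [] => simp [altWords]
  | c :: r =>
    intro w hw
    by_cases hc : PySem.Str.isalpha c
    · rw [altWords, if_pos hc] at hw
      rcases List.mem_append.mp hw with hw | hw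
      · have hwv : w = String.ofList (c :: r.takeWhile PySem.Str.isalpha) := by
          rcases Bool.eq_false_or_eq_true (decide (ml ≤ (((c :: r.takeWhile
            PySem.Str.isalpha)).length : Int) ∧ PySem.Set.contains pvStop
            (String.ofList (c :: r.takeWhile PySem.Str.isalpha)) = false)) with hd | hd <;>
            simp_all
        subst hwv
        intro hmem
        simp only [String.toList_ofList, List.mem_cons] at hmem
        rcases hmem with hmem | hmem
        · rw [← hmem] at hc; exact absurd hc (by decide)
        · have := List.mem_takeWhile_imp hmem
          exact absurd this (by decide)
      · exact wordsNoSpace ml (r.dropWhile PySem.Str.isalpha) w hw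
    · rw [altWords, if_neg hc] at hw
      exact wordsNoSpace ml r w hw
termination_by l.length
decreasing_by
  all_goals simp only [List.length_cons]
  all_goals first
    | exact Nat.lt_succ_of_le (List.length_dropWhile_le _ _)
    | omega

def pvPhrases (ws : List String) : List String :=
  (ws.zip ws.tail).map (fun p => p.1 ++ " " ++ p.2)

theorem phrHasSpace (ws : List String) : ∀ x ∈ pvPhrases ws, ' ' ∈ x.toList := by
  intro x hx
  rcases List.mem_map.mp hx with ⟨p, _, rfl⟩
  rw [String.toList_append, String.toList_append]
  simp [show (" " : String).toList = [' '] from rfl]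

-- a fold of per-title folds is a fold over the flattened token list
theorem foldl_flatMap' {α β δ : Type} (l : List α) (g : α → List β) (f : δ → β → δ) (i : δ) :
    l.foldl (fun d t => (g t).foldl f d) i = (l.flatMap g).foldl f i := by
  induction l generalizing i with
  | nil => rfl
  | cons a t ih => simp [List.flatMap_cons, List.foldl_append, ih]

theorem enumPhrAux (ws : List String) (k : Nat) :
    (((PySem.List.enumerate (ws.drop k) (k : Int)).filter
        (fun e => decide (e.1 < (ws.length : Int) - 1))).map
        (fun e => e.2 ++ " " ++ PySem.List.pyGetD ws (e.1 + 1) ""))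
    = ((ws.drop k).zip (ws.drop (k+1))).map (fun p => p.1 ++ " " ++ p.2) := by
  by_cases hk : k < ws.length
  · rw [List.drop_eq_getElem_cons hk, PySem.List.enumerate_cons]
    by_cases hk1 : k + 1 < ws.length
    · have hd : decide ((k : Int) < (ws.length : Int) - 1) = true := by
        simp only [decide_eq_true_eq]; omega
      have hcast : ((k : Int) + 1) = (((k + 1 : Nat)) : Int) := by push_cast; ring
      have hget : PySem.List.pyGetD ws (((k + 1 : Nat) : Int)) "" = ws[k + 1] := by
        rw [PySem.List.pyGetD_natCast, List.getD_eq_getElem?_getD,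
          List.getElem?_eq_getElem hk1]
        rfl
      simp only [List.filter_cons, hd]
      rw [if_pos trivial, List.map_cons, hcast, hget, enumPhrAux ws (k + 1)]
      rw [List.drop_eq_getElem_cons hk1, List.zip_cons_cons, List.map_cons]
    · have hcond : ¬ ((k : Int) < (ws.length : Int) - 1) := by omega
      have hdrop : ws.drop (k + 1) = [] := by
        rw [List.drop_eq_nil_iff]; omega
      simp [hcond, hdrop, PySem.List.enumerate_nil]
  · have h1 : ws.drop k = [] := by rw [List.drop_eq_nil_iff]; omega
    have h2 : ws.drop (k + 1) = [] := by rw [List.drop_eq_nil_iff]; omega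
    simp [h1, h2, PySem.List.enumerate_nil]
termination_by ws.length - k
decreasing_by omega

def pvMod (d : PySem.Dict String Int) (x : String) : PySem.Dict String Int :=
  d.modify x 0 (· + 1)

theorem aCountStep_eq (ml : Int) (s : PySem.Dict String Int × PySem.Dict String Int) (t : String) :
    aCountStep ml s t =
      ((altWords ml (PySem.Str.lower t).toList).foldl pvMod s.1,
       (pvPhrases (altWords ml (PySem.Str.lower t).toList)).foldl pvMod s.2) := by
  unfold aCountStep
  rw [aWords_eq]
  set ws := altWords ml (PySem.Str.lower t).toList with hws
  rw [PySem.List.foldl_prod_mk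
    (f := fun d (e : Int × String) => PySem.Dict.modify d e.2 0 (· + 1))
    (g := fun d (e : Int × String) =>
      if e.1 < (ws.length : Int) - 1 then
        PySem.Dict.modify d (e.2 ++ " " ++ PySem.List.pyGetD ws (e.1 + 1) "") 0 (· + 1)
      else d)]
  refine congrArg₂ Prod.mk ?_ ?_
  · -- word_counts component: fold over enumerate = fold over the words themselves
    conv_rhs => rw [← PySem.List.map_snd_enumerate ws 0, List.foldl_map]
    rfl
  · -- phrase_counts component: guard → filter → map → the zip phrase list
    rw [PySem.List.foldl_ite_eq_foldl_filter
      (p := fun e : Int × String => e.1 < (ws.length : Int) - 1)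
      (f := fun d (e : Int × String) =>
        PySem.Dict.modify d (e.2 ++ " " ++ PySem.List.pyGetD ws (e.1 + 1) "") 0 (· + 1))]
    have h0 := enumPhrAux ws 0
    simp only [List.drop_zero, Nat.zero_add, List.drop_one, Int.natCast_zero] at h0
    rw [← List.foldl_map (f := fun e : Int × String =>
        e.2 ++ " " ++ PySem.List.pyGetD ws (e.1 + 1) "")
      (g := fun d x => PySem.Dict.modify d x 0 (· + 1))]
    rw [h0]
    unfold pvMod pvPhrases
    rfl

-- counting dictionaries: keys and values
theorem keys_foldl_pvMod (L : List String) :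
    (L.foldl pvMod PySem.Dict.empty).keys = PySem.Set.ofList L := by
  unfold pvMod
  rw [PySem.Dict.keys_foldl_modify L 0 (fun _ _ => (· + 1)) PySem.Dict.empty]
  rw [PySem.Dict.keys_empty, PySem.Set.update_nil_left]

theorem getD_foldl_pvMod (L : List String) (x : String) :
    (L.foldl pvMod PySem.Dict.empty).getD x 0 = (L.count x : Int) := by
  unfold pvMod
  rw [PySem.Dict.getD_foldl_modify_add_one, PySem.Dict.getD_empty]
  ring

theorem update_items_of_fresh (d : PySem.Dict String Int) (ps : List (String × Int))
    (hnd : (ps.map Prod.fst).Nodup) (h : ∀ p ∈ ps, d.contains p.1 = false) :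
    (d.update ps).items = d.items ++ ps := by
  induction ps generalizing d with
  | nil => simp [PySem.Dict.update]
  | cons p t ih =>
    have hins : (d.insert p.1 p.2).items = d.items ++ [p] := by
      unfold PySem.Dict.insert
      rw [if_neg (by rw [h p (by simp)]; simp)]
    have hstep : (d.update (p :: t)) = (d.insert p.1 p.2).update t := by
      simp [PySem.Dict.update]
    rw [hstep, ih (d.insert p.1 p.2) (by simpa using hnd.of_cons)]
    · rw [hins]; simp
    · intro q hq
      rw [PySem.Dict.contains_insert, h q (by simp [hq])]
      simp only [List.map_cons, List.nodup_cons] at hnd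
      have : q.1 ≠ p.1 := by
        intro he
        exact hnd.1 (he ▸ List.mem_map_of_mem hq)
      simp [this]

-- sorted2 with an identity tie-break key is sorted with one lexicographic key
theorem s2lex (xs : List String) (f : String → Int) :
    PySem.List.sorted2 xs f (fun x => x) =
      PySem.List.sorted xs (fun x => toLex (f x, x)) := by
  unfold PySem.List.sorted2 PySem.List.sorted
  simp only [Bool.false_eq_true, if_false]
  congr 1
  funext acc x
  congr 1
  funext a b
  have hlex : (toLex (f a, a) < toLex (f b, b)) ↔
      (f a < f b ∨ (f a = f b ∧ a < b)) := Prod.Lex.lt_iff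
  by_cases h1 : f a < f b
  · have hR : toLex (f a, a) < toLex (f b, b) := hlex.mpr (Or.inl h1)
    simp [h1, hR]
  · by_cases h2 : f b < f a
    · have hR : ¬ (toLex (f a, a) < toLex (f b, b)) := by
        rw [hlex]; rintro (h | ⟨he, _⟩)
        · exact h1 h
        · omega
      simp [h1, h2, hR]
    · have he : f a = f b := le_antisymm (not_lt.mp h2) (not_lt.mp h1)
      by_cases h3 : a < b
      · have hR : toLex (f a, a) < toLex (f b, b) := hlex.mpr (Or.inr ⟨he, h3⟩)
        simp [h1, h2, h3, hR]
      · have hR : ¬ (toLex (f a, a) < toLex (f b, b)) := by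
          rw [hlex]; rintro (h | ⟨_, h⟩)
          · exact h1 h
          · exact h3 h
        simp [h1, h2, h3, hR]

theorem keyInj (g : String → Int) :
    Function.Injective (fun x : String => toLex (g x, x)) := by
  intro a b h
  have := congrArg (fun y : Lex (Int × String) => (ofLex y).2) h
  simpa using this

def pvW (ml : Int) (products : List String) : List String :=
  products.flatMap (fun t => altWords ml (PySem.Str.lower t).toList)

def pvP (ml : Int) (products : List String) : List String :=
  products.flatMap (fun t => pvPhrases (altWords ml (PySem.Str.lower t).toList))

def pvT (ml : Int) (products : List String) : List String :=
  products.flatMap (fun t =>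
    altWords ml (PySem.Str.lower t).toList ++ pvPhrases (altWords ml (PySem.Str.lower t).toList))

theorem aState (ml : Int) (products : List String) :
    products.foldl (aCountStep ml) (PySem.Dict.empty, PySem.Dict.empty)
    = ((pvW ml products).foldl pvMod PySem.Dict.empty,
       (pvP ml products).foldl pvMod PySem.Dict.empty) := by
  have hfun : aCountStep ml = fun s t =>
      ((altWords ml (PySem.Str.lower t).toList).foldl pvMod s.1,
       (pvPhrases (altWords ml (PySem.Str.lower t).toList)).foldl pvMod s.2) :=
    funext fun s => funext fun t => aCountStep_eq ml s t
  rw [hfun, PySem.List.foldl_prod_mk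
    (f := fun d t => (altWords ml (PySem.Str.lower t).toList).foldl pvMod d)
    (g := fun d t => (pvPhrases (altWords ml (PySem.Str.lower t).toList)).foldl pvMod d)]
  rw [foldl_flatMap', foldl_flatMap']
  rfl

theorem bState (ml : Int) (products : List String) :
    products.foldl
      (fun d title =>
        (((altWords ml (PySem.Str.lower title).toList) ++
            ((altWords ml (PySem.Str.lower title).toList).zip
              (altWords ml (PySem.Str.lower title).toList).tail).map
              (fun p => p.1 ++ " " ++ p.2)).foldl
          (fun d t => d.modify t 0 (· + 1)) d))
      PySem.Dict.empty
    = (pvT ml products).foldl pvMod PySem.Dict.empty := by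
  have hph : ∀ ws : List String,
      (ws.zip ws.tail).map (fun p : String × String => p.1 ++ " " ++ p.2) = pvPhrases ws :=
    fun _ => rfl
  simp only [hph]
  rw [foldl_flatMap' products
    (g := fun t => altWords ml (PySem.Str.lower t).toList ++
      pvPhrases (altWords ml (PySem.Str.lower t).toList))
    (f := fun d t => PySem.Dict.modify d t 0 (· + 1))]
  rfl

theorem flatPerm {α β : Type} (l : List α) (f g : α → List β) :
    (l.flatMap (fun t => f t ++ g t)).Perm (l.flatMap f ++ l.flatMap g) := by
  induction l with
  | nil => simp
  | cons a t ih =>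
    simp only [List.flatMap_cons]
    have h1 : ((f a ++ g a) ++ t.flatMap (fun x => f x ++ g x)).Perm
        ((f a ++ g a) ++ (t.flatMap f ++ t.flatMap g)) := List.Perm.append_left _ ih
    refine h1.trans ?_
    rw [List.append_assoc, List.append_assoc]
    refine List.Perm.append_left _ ?_
    rw [← List.append_assoc]
    refine (List.Perm.append_right _ (List.perm_append_comm)).trans ?_
    rw [List.append_assoc]

theorem noSpaceW (ml : Int) (products : List String) :
    ∀ x ∈ pvW ml products, ' ' ∉ x.toList := by
  intro x hx
  rcases List.mem_flatMap.mp hx with ⟨t, _, hxt⟩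
  exact wordsNoSpace ml _ x hxt

theorem spaceP (ml : Int) (products : List String) :
    ∀ x ∈ pvP ml products, ' ' ∈ x.toList := by
  intro x hx
  rcases List.mem_flatMap.mp hx with ⟨t, _, hxt⟩
  exact phrHasSpace _ x hxt

theorem countT (ml : Int) (products : List String) (x : String) :
    (pvT ml products).count x = (pvW ml products).count x + (pvP ml products).count x := by
  unfold pvT pvW pvP
  rw [(flatPerm products (fun t => altWords ml (PySem.Str.lower t).toList)
    (fun t => pvPhrases (altWords ml (PySem.Str.lower t).toList))).count_eq]
  exact List.count_append

-- ===== VERDICT (by name: the statement is the Claim_ definition above) =====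
theorem extract_title_tags_spec : Claim_equal_extract_title_tags := by
  intro products max_words ml _
  unfold Spec_extract_title_tags
  show extract_title_tags products max_words ml = extract_title_tags_alt products max_words ml
  unfold extract_title_tags extract_title_tags_alt
  dsimp only
  rw [aState, bState]
  set wc := (pvW ml products).foldl pvMod PySem.Dict.empty with hwc
  set pc := (pvP ml products).foldl pvMod PySem.Dict.empty with hpc
  set bd := (pvT ml products).foldl pvMod PySem.Dict.empty with hbd
  have hWkeys : wc.keys = PySem.Set.ofList (pvW ml products) := keys_foldl_pvMod _
  have hPkeys : pc.keys = PySem.Set.ofList (pvP ml products) := keys_foldl_pvMod _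
  have hBkeys : bd.keys = PySem.Set.ofList (pvT ml products) := keys_foldl_pvMod _
  -- words never contain a space, phrases always do: the two key sets are disjoint
  have hdisj : ∀ x, x ∈ pvW ml products → x ∈ pvP ml products → False := fun x hw hp =>
    noSpaceW ml products x hw (spaceP ml products x hp)
  have hfresh : ∀ p ∈ pc.items, wc.contains p.1 = false := by
    intro p hp
    have hkey : p.1 ∈ pc.keys := List.mem_map_of_mem hp
    rw [hPkeys, PySem.Set.mem_ofList] at hkey
    by_contra hcon
    have : wc.contains p.1 = true := by
      cases h : wc.contains p.1
      · exact absurd h hcon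
      · rfl
    rw [PySem.Dict.contains_iff_mem_keys, hWkeys, PySem.Set.mem_ofList] at this
    exact hdisj p.1 this hkey
  have hnd : (pc.items.map Prod.fst).Nodup := by
    have : pc.items.map Prod.fst = pc.keys := rfl
    rw [this, hPkeys]
    exact PySem.Set.nodup_ofList _
  have hitems : (wc.update pc.items).items = wc.items ++ pc.items :=
    update_items_of_fresh wc pc.items hnd hfresh
  have hK1 : (wc.update pc.items).keys = wc.keys ++ pc.keys := by
    unfold PySem.Dict.keys
    rw [hitems, List.map_append]
  have hget : ∀ x, (wc.update pc.items).get? x = (wc.get? x).or (pc.get? x) := by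
    intro x
    unfold PySem.Dict.get?
    rw [hitems, List.find?_append]
    cases List.find? (fun p => p.1 == x) wc.items <;> simp
  -- value agreement on every key of A's combined dict
  have hcc : ∀ x ∈ (wc.update pc.items).keys,
      (wc.update pc.items).getD x 0 = bd.getD x 0 := by
    intro x hx
    have hbdv : bd.getD x 0 = ((pvT ml products).count x : Int) := getD_foldl_pvMod _ _
    rw [hK1, List.mem_append] at hx
    have hxWP : x ∈ pvW ml products ∨ x ∈ pvP ml products := by
      rcases hx with hx | hx
      · left; rw [hWkeys, PySem.Set.mem_ofList] at hx; exact hx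
      · right; rw [hPkeys, PySem.Set.mem_ofList] at hx; exact hx
    rcases hxWP with hxW | hxP
    · -- x is a word: phrase count is 0
      have hP0 : (pvP ml products).count x = 0 := by
        rw [List.count_eq_zero]
        intro hc
        exact hdisj x hxW hc
      have hwcx : wc.get? x = some (wc.getD x 0) := by
        cases h : wc.get? x with
        | some v => rw [PySem.Dict.getD, h]; rfl
        | none =>
          rw [PySem.Dict.get?_eq_none_iff_contains, ← Bool.not_eq_true,
            PySem.Dict.contains_iff_mem_keys, hWkeys] at h
          exact absurd ((PySem.Set.mem_ofList _ _).mpr hxW) h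
      have : (wc.update pc.items).getD x 0 = wc.getD x 0 := by
        rw [PySem.Dict.getD, hget x, hwcx]; rfl
      rw [this, hbdv, countT, hP0, getD_foldl_pvMod]
      push_cast; ring
    · -- x is a phrase: it is not a word key
      have hW0 : (pvW ml products).count x = 0 := by
        rw [List.count_eq_zero]
        intro hc
        exact hdisj x hc hxP
      have hwcx : wc.get? x = none := by
        rw [PySem.Dict.get?_eq_none_iff_contains]
        cases h : wc.contains x
        · rfl
        · rw [PySem.Dict.contains_iff_mem_keys, hWkeys, PySem.Set.mem_ofList] at h
          exact absurd h (fun hc => hdisj x hc hxP)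
      have : (wc.update pc.items).getD x 0 = pc.getD x 0 := by
        rw [PySem.Dict.getD, hget x, hwcx]; rfl
      rw [this, hbdv, countT, hW0, getD_foldl_pvMod]
      push_cast; ring
  -- the key lists are permutations of each other
  have hKperm : (wc.update pc.items).keys.Perm bd.keys := by
    rw [hK1, hWkeys, hPkeys, hBkeys]
    have h1 : (PySem.Set.ofList (pvW ml products) ++ PySem.Set.ofList (pvP ml products)).Nodup := by
      refine List.Nodup.append (PySem.Set.nodup_ofList _) (PySem.Set.nodup_ofList _) ?_
      intro a ha hb
      rw [PySem.Set.mem_ofList] at ha hb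
      exact hdisj a ha hb
    refine (List.perm_ext_iff_of_nodup h1 (PySem.Set.nodup_ofList _)).mpr ?_
    intro a
    rw [List.mem_append, PySem.Set.mem_ofList, PySem.Set.mem_ofList, PySem.Set.mem_ofList]
    constructor
    · intro h
      exact ((flatPerm products _ _).mem_iff).mpr (List.mem_append.mpr h)
    · intro h
      exact List.mem_append.mp (((flatPerm products _ _).mem_iff).mp h)
  rw [s2lex, s2lex]
  congr 1
  refine PySem.List.eq_of_perm_of_pairwise_le_of_injective
    (key := fun x => toLex (-(bd.getD x 0), x)) (keyInj _) ?_ ?_ ?_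
  · exact ((PySem.List.sorted_perm _ _ _).trans hKperm).trans
      (PySem.List.sorted_perm _ _ _).symm
  · refine (PySem.List.sorted_pairwise (wc.update pc.items).keys
      (fun x => toLex (-((wc.update pc.items).getD x 0), x))).imp_of_mem ?_
    intro a b ha hb hr
    rw [PySem.List.mem_sorted] at ha hb
    have hca := hcc a ha
    have hcb := hcc b hb
    simpa [hca, hcb] using hr
  · exact PySem.List.sorted_pairwise _ _
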